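-- pv_equiv track=rewrite | github.com/Eunyeol-Lucas/algorithm_solution | COSPRO/몬스터잡기.py | solution
-- ===== SOURCE A (Python) =====
-- def solution(enemies, armies):
-- 	answer = 0
-- 	enemies.sort(reverse = True)
-- 	armies.sort(reverse = True)
-- 	for army in armies:
-- 		cnt = 0
-- 		for enemy in enemies:
-- 			if army >= enemy:
-- 				cnt += 1
-- 				answer = max(cnt, answer)
--
-- 	return answer
-- ===== SOURCE B (Python) =====
-- def solution(enemies, armies):
--     # Note: A sorts both argument lists in place; B does not mutate them
--     # (equivalence is about the return value).
--     if not armies: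
--         return 0
--     m = max(armies)
--     return sum(1 for e in enemies if e <= m)
-- ===== Notes on version B (the rewrite author's own statement) =====
-- stated objective: faster
-- what changed: Replaces the double sort plus nested count-and-max loops by a single pass: the answer is just the number of enemies not exceeding max(armies) (0 when armies is empty).
import Mathlib
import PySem

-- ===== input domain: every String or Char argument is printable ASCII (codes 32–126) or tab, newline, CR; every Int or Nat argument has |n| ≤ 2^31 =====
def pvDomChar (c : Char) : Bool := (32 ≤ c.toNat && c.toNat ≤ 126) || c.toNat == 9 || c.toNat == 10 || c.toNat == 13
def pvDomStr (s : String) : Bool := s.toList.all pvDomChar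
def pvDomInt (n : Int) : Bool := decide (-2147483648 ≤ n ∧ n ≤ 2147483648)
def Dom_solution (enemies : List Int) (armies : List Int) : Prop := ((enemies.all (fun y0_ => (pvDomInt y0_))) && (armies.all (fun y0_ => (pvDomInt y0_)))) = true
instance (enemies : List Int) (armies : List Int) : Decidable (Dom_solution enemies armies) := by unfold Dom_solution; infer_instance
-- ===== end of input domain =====

-- B replaces A's double sort + nested O(n*m) loops by one pass counting enemies ≤ max(armies): asymptotically faster.
-- A sorts both argument lists in place; B does not mutate them — the equivalence proved here is about the return value only.


-- ===== PORT A =====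
def solution (enemies : List Int) (armies : List Int) : Int :=
  let enemies := PySem.List.sorted enemies (fun x => x) true
  let armies := PySem.List.sorted armies (fun x => x) true
  armies.foldl
    (fun answer army =>
      (enemies.foldl
        (fun (p : Int × Int) enemy =>
          if army ≥ enemy then (p.1 + 1, max (p.1 + 1) p.2) else p)
        ((0 : Int), answer)).2)
    0

-- ===== PORT B =====
def solution_alt (enemies : List Int) (armies : List Int) : Int :=
  match armies with
  | [] => 0
  | a :: rest =>
    let m := rest.foldl max a          -- max(armies)
    ((enemies.filter (fun e => decide (e ≤ m))).length : Int)

-- ===== PRECONDITION & SPEC =====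
def Spec_solution (enemies : List Int) (armies : List Int) (out : Int) : Prop := out = solution_alt enemies armies
instance (enemies : List Int) (armies : List Int) (out : Int) : Decidable (Spec_solution enemies armies out) := by unfold Spec_solution; infer_instance

-- ===== CLAIM (what is proved, stated in full; the proofs are below) =====
def Claim_equal_solution : Prop := ∀ (enemies : List Int) (armies : List Int), Dom_solution enemies armies → Spec_solution enemies armies (solution enemies armies)

-- ===== LEMMAS AND PROOFS =====

-- count of enemies ≤ w, as an Int
def cntE (enemies : List Int) (w : Int) : Int :=
  ((enemies.countP (fun e => decide (e ≤ w))) : Int)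

lemma cntE_nonneg (enemies : List Int) (w : Int) : 0 ≤ cntE enemies w := by
  simp [cntE]

lemma cntE_mono (enemies : List Int) {w1 w2 : Int} (h : w1 ≤ w2) :
    cntE enemies w1 ≤ cntE enemies w2 := by
  unfold cntE
  have := List.countP_mono_left (l := enemies)
    (p := fun e => decide (e ≤ w1)) (q := fun e => decide (e ≤ w2))
    (by intro x _ hx; simp at hx ⊢; omega)
  exact_mod_cast this

-- inner loop of A: final cnt is c + count, final answer is max of old answer with that (when any hit)
lemma inner_loop (army : Int) :
    ∀ (l : List Int) (c a : Int),
      l.foldl (fun (p : Int × Int) enemy =>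
          if army ≥ enemy then (p.1 + 1, max (p.1 + 1) p.2) else p) (c, a)
      = (c + cntE l army, if cntE l army = 0 then a else max a (c + cntE l army)) := by
  intro l
  induction l with
  | nil => intro c a; simp [cntE]
  | cons e t ih =>
    intro c a
    by_cases h : army ≥ e
    · have he : (e ≤ army) := h
      have hc : cntE (e :: t) army = 1 + cntE t army := by
        simp [cntE, he]; ring
      have hnn := cntE_nonneg t army
      simp only [List.foldl_cons, if_pos h, ih]
      rw [hc]
      rw [if_neg (by omega : ¬ ((1 : Int) + cntE t army = 0))]
      by_cases h0 : cntE t army = 0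
      · rw [if_pos h0]
        simp only [Prod.mk.injEq]
        refine ⟨by omega, ?_⟩
        simp only [max_def]
        split_ifs <;> omega
      · rw [if_neg h0]
        simp only [Prod.mk.injEq]
        refine ⟨by omega, ?_⟩
        simp only [max_def]
        split_ifs <;> omega
    · have he : ¬ (e ≤ army) := h
      have hc : cntE (e :: t) army = cntE t army := by
        simp [cntE, he]
      simp only [List.foldl_cons, if_neg h, ih, hc]

-- outer loop of A collapses to a running max of cntE over the armies
lemma outer_loop (es : List Int) :
    ∀ (l : List Int) (a : Int), 0 ≤ a →
      l.foldl (fun answer army =>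
          (es.foldl (fun (p : Int × Int) enemy =>
              if army ≥ enemy then (p.1 + 1, max (p.1 + 1) p.2) else p)
            ((0 : Int), answer)).2) a
      = l.foldl (fun answer army => max answer (cntE es army)) a := by
  intro l
  induction l with
  | nil => intro a _; rfl
  | cons w t ih =>
    intro a ha
    have step : (es.foldl (fun (p : Int × Int) enemy =>
          if w ≥ enemy then (p.1 + 1, max (p.1 + 1) p.2) else p)
        ((0 : Int), a)).2 = max a (cntE es w) := by
      rw [inner_loop]
      by_cases h0 : cntE es w = 0
      · simp [h0, max_eq_left ha]
      · simp [h0]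
    simp only [List.foldl_cons, step]
    exact ih _ (le_trans ha (le_max_left _ _))

lemma foldl_max_mem : ∀ (rest : List Int) (a : Int), rest.foldl max a ∈ a :: rest := by
  intro rest
  induction rest with
  | nil => intro a; simp
  | cons b t ih =>
    intro a
    simp only [List.foldl_cons]
    have this1 := ih (max a b)
    rcases List.mem_cons.mp this1 with h | h
    · rw [h]
      rcases max_choice a b with h' | h' <;> rw [h'] <;> simp
    · exact List.mem_cons.mpr (Or.inr (List.mem_cons.mpr (Or.inr h)))

lemma le_foldl_max_init : ∀ (t : List Int) (i : Int), i ≤ t.foldl max i := by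
  intro t
  induction t with
  | nil => intro i; simp
  | cons b tt ih =>
    intro i
    simp only [List.foldl_cons]
    exact le_trans (le_max_left i b) (ih (max i b))

lemma le_foldl_max : ∀ (rest : List Int) (a w : Int), w ∈ a :: rest → w ≤ rest.foldl max a := by
  intro rest
  induction rest with
  | nil => intro a w h; simp at h; simp [h]
  | cons b t ih =>
    intro a w h
    simp only [List.foldl_cons]
    have hmem : w = a ∨ w = b ∨ w ∈ t := by simpa using h
    rcases hmem with h1 | h1 | h1
    · rw [h1]; exact le_trans (le_max_left a b) (le_foldl_max_init t (max a b))
    · rw [h1]; exact le_trans (le_max_right a b) (le_foldl_max_init t (max a b))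
    · exact ih (max a b) w (List.mem_cons.mpr (Or.inr h1))

-- running max over a list is bounded by any upper bound of {init} ∪ f '' l …
lemma foldl_max_le (f : Int → Int) (B : Int) :
    ∀ (l : List Int) (i : Int), i ≤ B → (∀ w ∈ l, f w ≤ B) →
      l.foldl (fun a w => max a (f w)) i ≤ B := by
  intro l
  induction l with
  | nil => intro i hi _; simpa using hi
  | cons w t ih =>
    intro i hi hf
    simp only [List.foldl_cons]
    exact ih _ (max_le hi (hf w (by simp))) (fun x hx => hf x (by simp [hx]))

lemma foldl_max_ge_init (f : Int → Int) :
    ∀ (l : List Int) (i : Int), i ≤ l.foldl (fun a w => max a (f w)) i := by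
  intro l
  induction l with
  | nil => intro i; simp
  | cons v t ih =>
    intro i
    simp only [List.foldl_cons]
    exact le_trans (le_max_left _ _) (ih _)

-- … and dominates f of every member
lemma foldl_max_ge (f : Int → Int) :
    ∀ (l : List Int) (i : Int), ∀ w ∈ l, f w ≤ l.foldl (fun a w => max a (f w)) i := by
  intro l
  induction l with
  | nil => intro i w hw; simp at hw
  | cons v t ih =>
    intro i w hw
    simp only [List.foldl_cons]
    rcases List.mem_cons.mp hw with h | h
    · rw [h]; exact le_trans (le_max_right i (f v)) (foldl_max_ge_init f t (max i (f v)))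
    · exact ih (max i (f v)) w h

lemma cntE_perm (es es' : List Int) (h : es.Perm es') (w : Int) : cntE es w = cntE es' w := by
  unfold cntE
  rw [h.countP_eq]

-- ===== VERDICT (by name: the statement is the Claim_ definition above) =====
theorem solution_spec : Claim_equal_solution := by
  unfold Claim_equal_solution
  intro enemies armies _
  unfold Spec_solution
  unfold solution
  simp only []
  set es := PySem.List.sorted enemies (fun x => x) true with hes
  set ar := PySem.List.sorted armies (fun x => x) true with har
  have hperm : es.Perm enemies := PySem.List.sorted_perm ..
  have haperm : ar.Perm armies := PySem.List.sorted_perm ..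
  have hce : ∀ w, cntE es w = cntE enemies w := fun w => cntE_perm es enemies hperm w
  rw [outer_loop es ar 0 (le_refl 0)]
  simp only [hce]
  cases harm : armies with
  | nil =>
    have hnil : ar = [] := by
      have hl := haperm.length_eq
      rw [harm] at hl
      exact List.length_eq_zero_iff.mp (by simpa using hl)
    rw [hnil]
    rfl
  | cons a rest =>
    have hBr : solution_alt enemies (a :: rest) =
        ((enemies.filter (fun e => decide (e ≤ rest.foldl max a))).length : Int) := rfl
    rw [hBr]
    set M := rest.foldl max a with hM
    have hMmem0 : M ∈ armies := by rw [harm]; exact foldl_max_mem rest a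
    have hMmem' : M ∈ ar := (haperm.mem_iff).mpr hMmem0
    have hub : ∀ w ∈ ar, w ≤ M := by
      intro w hw
      refine le_foldl_max rest a w ?_
      rw [← harm]
      exact (haperm.mem_iff).mp hw
    have hfilter : ((enemies.filter (fun e => decide (e ≤ M))).length : Int) = cntE enemies M := by
      simp [cntE, List.countP_eq_length_filter]
    rw [hfilter]
    apply le_antisymm
    · apply foldl_max_le
      · exact cntE_nonneg enemies M
      · intro w hw
        exact cntE_mono enemies (hub w hw)
    · exact foldl_max_ge (cntE enemies) ar 0 M hMmem'
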